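-- pv_equiv track=rewrite | github.com/donyarz/DAG | Algorithm-2.py | find_ready_nodes
-- ===== SOURCE A (Python) =====
-- def find_ready_nodes(nodes: list, edges: list[tuple], completed_nodes: set) -> list:
--     """
--     Finds nodes that are ready for execution (all predecessors are completed).
--     Assumes source node is initially in completed_nodes.
--     """
--     ready_nodes = []
--
--     for node in nodes:
--         if node == "sink" or node in completed_nodes:
--             continue
--
--         predecessors_of_node = [src for src, dest in edges if dest == node]
--
--         if not predecessors_of_node or all(pred in completed_nodes for pred in predecessors_of_node):
--             ready_nodes.append(node)
--
--     return ready_nodes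
-- ===== SOURCE B (Python) =====
-- def find_ready_nodes(nodes: list, edges: list[tuple], completed_nodes: set) -> list:
--     blocked = {dest for src, dest in edges if src not in completed_nodes}
--     return [node for node in nodes
--             if node != "sink" and node not in completed_nodes and node not in blocked]
-- ===== Notes on version B (the rewrite author's own statement) =====
-- stated objective: faster
-- what changed: Instead of scanning all edges per node to collect its predecessors and testing all(...), B makes one pass over edges building a 'blocked' set of destinations with an uncompleted source, then filters nodes by set membership.
import Mathlib
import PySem

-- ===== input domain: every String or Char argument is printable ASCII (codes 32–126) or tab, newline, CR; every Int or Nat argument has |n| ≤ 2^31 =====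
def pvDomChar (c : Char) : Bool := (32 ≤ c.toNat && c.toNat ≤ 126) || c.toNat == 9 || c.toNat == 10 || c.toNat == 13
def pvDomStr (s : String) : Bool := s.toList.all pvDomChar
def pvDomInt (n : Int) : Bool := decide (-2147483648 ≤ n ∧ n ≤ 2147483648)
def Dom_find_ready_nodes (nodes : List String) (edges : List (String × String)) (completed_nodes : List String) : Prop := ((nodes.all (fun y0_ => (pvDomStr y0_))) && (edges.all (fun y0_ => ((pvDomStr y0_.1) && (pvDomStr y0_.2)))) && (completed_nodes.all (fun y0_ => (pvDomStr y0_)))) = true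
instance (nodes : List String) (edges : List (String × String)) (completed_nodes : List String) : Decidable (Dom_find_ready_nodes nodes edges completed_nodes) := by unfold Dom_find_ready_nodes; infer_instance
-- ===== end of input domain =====

-- B replaces A's per-node predecessor scan with one pass over edges building a 'blocked' set, then filters nodes by membership.


-- ===== PORT A =====
def find_ready_nodes (nodes : List String) (edges : List (String × String)) (completed_nodes : List String) : List String :=
  nodes.foldl (fun ready_nodes node =>
    if node == "sink" || completed_nodes.contains node then ready_nodes
    else
      let predecessors_of_node := (edges.filter (fun e => e.2 == node)).map (fun e => e.1)
      if predecessors_of_node.isEmpty || predecessors_of_node.all (fun pred => completed_nodes.contains pred) then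
        ready_nodes ++ [node]
      else ready_nodes) []

-- ===== PORT B =====
def find_ready_nodes_alt (nodes : List String) (edges : List (String × String)) (completed_nodes : List String) : List String :=
  let blocked : PySem.Set String :=
    edges.foldl (fun s e => if completed_nodes.contains e.1 then s else PySem.Set.add s e.2) PySem.Set.empty
  nodes.filter (fun node => node != "sink" && !(completed_nodes.contains node) && !(blocked.contains node))

-- ===== PRECONDITION & SPEC =====
def Spec_find_ready_nodes (nodes : List String) (edges : List (String × String)) (completed_nodes : List String) (out : List String) : Prop := out = find_ready_nodes_alt nodes edges completed_nodes
instance (nodes : List String) (edges : List (String × String)) (completed_nodes : List String) (out : List String) : Decidable (Spec_find_ready_nodes nodes edges completed_nodes out) := by unfold Spec_find_ready_nodes; infer_instance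

-- ===== CLAIM (what is proved, stated in full; the proofs are below) =====
def Claim_equal_find_ready_nodes : Prop := ∀ (nodes : List String) (edges : List (String × String)) (completed_nodes : List String), Dom_find_ready_nodes nodes edges completed_nodes → Spec_find_ready_nodes nodes edges completed_nodes (find_ready_nodes nodes edges completed_nodes)

-- ===== LEMMAS AND PROOFS =====

-- membership in a PySem.Set after add, as a Bool equation
lemma contains_add (s : PySem.Set String) (x n : String) :
    (PySem.Set.add s x).contains n = (s.contains n || x == n) := by
  rw [Bool.eq_iff_iff]
  simp only [PySem.Set.contains, Bool.or_eq_true, List.contains_iff_mem, PySem.Set.mem_add,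
    beq_iff_eq]
  tauto

-- membership in B's 'blocked' accumulator, by induction over the edges
lemma blocked_contains (edges : List (String × String)) (completed_nodes : List String)
    (s : PySem.Set String) (n : String) :
    ((edges.foldl (fun s e => if completed_nodes.contains e.1 then s else PySem.Set.add s e.2) s).contains n)
      = (s.contains n || edges.any (fun e => e.2 == n && !(completed_nodes.contains e.1))) := by
  induction edges generalizing s with
  | nil => simp
  | cons e es ih =>
    simp only [List.foldl_cons, List.any_cons]
    by_cases hc : completed_nodes.contains e.1 = true
    · rw [if_pos hc, ih, hc]
      simp only [Bool.not_true, Bool.and_false, Bool.false_or]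
    · rw [Bool.not_eq_true] at hc
      rw [if_neg (by simpa using hc), ih, hc, contains_add]
      simp only [Bool.not_false, Bool.and_true, Bool.or_assoc]

-- A's per-node readiness test equals "not in B's blocked set"
lemma cond_eq (edges : List (String × String)) (completed_nodes : List String) (n : String) :
    (((edges.filter (fun e => e.2 == n)).map (fun e => e.1)).isEmpty ||
     ((edges.filter (fun e => e.2 == n)).map (fun e => e.1)).all (fun pred => completed_nodes.contains pred))
      = !(edges.foldl (fun s e => if completed_nodes.contains e.1 then s else PySem.Set.add s e.2)
            PySem.Set.empty).contains n := by
  rw [blocked_contains]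
  have hempty : (PySem.Set.empty : PySem.Set String).contains n = false := rfl
  rw [hempty, Bool.false_or]
  have h1 : ∀ (l : List String) (P : String → Bool), (l.isEmpty || l.all P) = l.all P := by
    intro l P; cases l <;> simp
  rw [h1, List.all_map, List.all_filter, List.any_eq_not_all_not, Bool.not_not]
  congr 1
  funext e
  cases h : (e.2 == n)
  · simp
  · cases hc : completed_nodes.contains e.1 <;> simp <;> simpa using hc

-- A's fold, rewritten as a single-condition append-if fold, then as a filter
lemma foldA_eq_filter (nodes : List String) (edges : List (String × String))
    (completed_nodes : List String) (acc : List String) :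
    nodes.foldl (fun ready_nodes node =>
      if node == "sink" || completed_nodes.contains node then ready_nodes
      else
        let predecessors_of_node := (edges.filter (fun e => e.2 == node)).map (fun e => e.1)
        if predecessors_of_node.isEmpty || predecessors_of_node.all (fun pred => completed_nodes.contains pred) then
          ready_nodes ++ [node]
        else ready_nodes) acc
    = acc ++ nodes.filter (fun node =>
        !(node == "sink" || completed_nodes.contains node) &&
        (((edges.filter (fun e => e.2 == node)).map (fun e => e.1)).isEmpty ||
         ((edges.filter (fun e => e.2 == node)).map (fun e => e.1)).all (fun pred => completed_nodes.contains pred))) := by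
  have hbody : (fun (ready_nodes : List String) (node : String) =>
      if node == "sink" || completed_nodes.contains node then ready_nodes
      else
        let predecessors_of_node := (edges.filter (fun e => e.2 == node)).map (fun e => e.1)
        if predecessors_of_node.isEmpty || predecessors_of_node.all (fun pred => completed_nodes.contains pred) then
          ready_nodes ++ [node]
        else ready_nodes)
    = (fun (ready_nodes : List String) (node : String) =>
        if (!(node == "sink" || completed_nodes.contains node) &&
            (((edges.filter (fun e => e.2 == node)).map (fun e => e.1)).isEmpty ||
             ((edges.filter (fun e => e.2 == node)).map (fun e => e.1)).all (fun pred => completed_nodes.contains pred)))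
        then ready_nodes ++ [node] else ready_nodes) := by
    funext ready_nodes node
    by_cases h1 : (node == "sink" || completed_nodes.contains node) = true
    · rw [if_pos h1, h1]; rfl
    · rw [if_neg h1]
      rw [Bool.not_eq_true] at h1
      rw [h1]; rfl
  rw [hbody, PySem.List.foldl_append_if_eq_filter]

-- ===== VERDICT (by name: the statement is the Claim_ definition above) =====
theorem find_ready_nodes_spec : Claim_equal_find_ready_nodes := by
  intro nodes edges completed_nodes _
  show find_ready_nodes nodes edges completed_nodes = find_ready_nodes_alt nodes edges completed_nodes
  unfold find_ready_nodes find_ready_nodes_alt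
  rw [foldA_eq_filter, List.nil_append]
  apply List.filter_congr
  intro n _
  rw [← cond_eq edges completed_nodes n]
  cases hs : (n == "sink") <;> cases hc : completed_nodes.contains n <;>
    cases h2 : (((edges.filter (fun e => e.2 == n)).map (fun e => e.1)).isEmpty ||
      ((edges.filter (fun e => e.2 == n)).map (fun e => e.1)).all (fun pred => completed_nodes.contains pred)) <;>
    simp [hs, bne]
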